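-- pv_equiv track=rewrite | github.com/luckyfrancisacidera/NEXSKILL | services/resume_parsing_service/app/parser/utils.py | drop_noise_lines
-- ===== SOURCE A (Python) =====
-- from typing import Iterable, List
--
-- def clean(s: str) -> str:
--     return " ".join(str(s).strip().split()).lower()
--
-- def drop_noise_lines(lines: List[str], noise_phrases: List[str]) -> List[str]:
--     out = []
--     for ln in lines:
--         cl = clean(ln)
--         if any(p in cl for p in noise_phrases):
--             continue
--         out.append(ln)
--     return out
-- ===== SOURCE B (Python) =====
-- from typing import List
--
-- def clean(s: str) -> str:
--     return " ".join(str(s).strip().split()).lower()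
--
-- def drop_noise_lines(lines: List[str], noise_phrases: List[str]) -> List[str]:
--     # Index phrases once by their first character; then scan each cleaned line
--     # position by position, testing only the phrases that can start there.
--     buckets = {}
--     has_empty = False
--     for p in noise_phrases:
--         if p:
--             buckets.setdefault(p[0], []).append(p)
--         else:
--             has_empty = True
--     def noisy(cl):
--         if has_empty:
--             return True
--         for i in range(len(cl)):
--             for p in buckets.get(cl[i], ()):
--                 if cl.startswith(p, i):
--                     return True
--         return False
--     return [ln for ln in lines if not noisy(clean(ln))]
-- ===== Notes on version B (the rewrite author's own statement) =====
-- stated objective: alternative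
-- what changed: A runs one substring search per noise phrase over each cleaned line inside an accumulator loop; B first builds a dict indexing the phrases by their first character, then filters the lines with a single position-by-position scan of each cleaned line, testing prefix matches only for the phrases bucketed under the character at that position.
import Mathlib
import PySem

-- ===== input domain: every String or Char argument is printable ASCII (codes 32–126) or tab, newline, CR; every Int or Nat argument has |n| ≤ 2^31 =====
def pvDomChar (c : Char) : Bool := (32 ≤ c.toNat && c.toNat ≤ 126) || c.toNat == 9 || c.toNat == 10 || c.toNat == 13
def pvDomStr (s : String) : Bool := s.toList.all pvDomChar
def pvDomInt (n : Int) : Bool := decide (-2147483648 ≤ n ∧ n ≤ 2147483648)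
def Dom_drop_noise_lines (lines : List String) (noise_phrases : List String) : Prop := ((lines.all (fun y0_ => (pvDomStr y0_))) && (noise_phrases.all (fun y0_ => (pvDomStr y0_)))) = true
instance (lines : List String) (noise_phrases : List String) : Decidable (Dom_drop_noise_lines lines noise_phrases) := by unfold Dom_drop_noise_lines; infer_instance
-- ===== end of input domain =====

-- B indexes the noise phrases once by first character and then scans each cleaned
-- line position by position, testing only the phrases that can start there
-- (alternative algorithm; no speed claim).


-- ===== PORT A =====
-- clean(s) = " ".join(s.strip().split()).lower()  (str(s) is the identity on str)
def pyClean (s : String) : String :=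
  PySem.Str.lower (PySem.Str.join " " (PySem.Str.split₀ (PySem.Str.strip s)))

def drop_noise_lines (lines : List String) (noise_phrases : List String) : List String :=
  lines.foldl (fun out ln =>
    let cl := pyClean ln
    if noise_phrases.any (fun p => PySem.Str.isIn p cl) then out
    else out ++ [ln]) []

-- ===== PORT B =====
-- the build loop: buckets.setdefault(p[0], []).append(p) / has_empty = True
def buildBuckets (noise_phrases : List String) : PySem.Dict Char (List String) × Bool :=
  noise_phrases.foldl (fun st p =>
    match p.toList with
    | c :: _ => (st.1.insert c (st.1.getD c [] ++ [p]), st.2)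
    | [] => (st.1, true))
    (PySem.Dict.empty, false)

-- noisy(cl): cl.startswith(p, i) for 0 ≤ i is a prefix test on List.drop i;
-- cl[i] for i in range(len(cl)) is cl.toList[i]? (always some there: the none arm is a totality guard).
def noisyAlt (cl : String) (buckets : PySem.Dict Char (List String)) (has_empty : Bool) : Bool :=
  if has_empty then true
  else (List.range cl.toList.length).any (fun i =>
    match cl.toList[i]? with
    | some c => (buckets.getD c []).any (fun p => PySem.Chars.startswith (cl.toList.drop i) p.toList)
    | none => false)

def drop_noise_lines_alt (lines : List String) (noise_phrases : List String) : List String :=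
  let st := buildBuckets noise_phrases
  lines.filter (fun ln => !(noisyAlt (pyClean ln) st.1 st.2))

-- ===== PRECONDITION & SPEC =====
def Spec_drop_noise_lines (lines : List String) (noise_phrases : List String) (out : List String) : Prop := out = drop_noise_lines_alt lines noise_phrases
instance (lines : List String) (noise_phrases : List String) (out : List String) : Decidable (Spec_drop_noise_lines lines noise_phrases out) := by unfold Spec_drop_noise_lines; infer_instance

-- ===== CLAIM (what is proved, stated in full; the proofs are below) =====
def Claim_equal_drop_noise_lines : Prop := ∀ (lines : List String) (noise_phrases : List String), Dom_drop_noise_lines lines noise_phrases → Spec_drop_noise_lines lines noise_phrases (drop_noise_lines lines noise_phrases)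

-- ===== LEMMAS AND PROOFS =====

-- What the build loop produces: the empty flag records an empty phrase,
-- and bucket c holds exactly the phrases starting with c (those already in the
-- starting state, plus the scanned ones).
theorem buildBuckets_spec (noise_phrases : List String)
    (d : PySem.Dict Char (List String)) (b : Bool) :
    ((noise_phrases.foldl (fun st p =>
        match p.toList with
        | c :: _ => (st.1.insert c (st.1.getD c [] ++ [p]), st.2)
        | [] => (st.1, true)) (d, b)).2
      = (b || noise_phrases.any (fun p => p.toList.isEmpty)))
    ∧ ∀ c p, p ∈ (noise_phrases.foldl (fun st p =>
        match p.toList with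
        | c :: _ => (st.1.insert c (st.1.getD c [] ++ [p]), st.2)
        | [] => (st.1, true)) (d, b)).1.getD c []
      ↔ p ∈ d.getD c [] ∨ (p ∈ noise_phrases ∧ ∃ t, p.toList = c :: t) := by
  induction noise_phrases generalizing d b with
  | nil => simp
  | cons q qs ih =>
    match hq : q.toList with
    | [] =>
      simp only [List.foldl_cons, hq]
      refine ⟨?_, ?_⟩
      · rw [(ih d true).1]; simp [hq]
      · intro c p
        rw [(ih d true).2 c p]
        constructor
        · rintro (h | ⟨hp, t, ht⟩)
          · exact Or.inl h
          · exact Or.inr ⟨List.mem_cons_of_mem _ hp, t, ht⟩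
        · rintro (h | ⟨hp, t, ht⟩)
          · exact Or.inl h
          · rcases List.mem_cons.1 hp with rfl | hp
            · rw [hq] at ht; cases ht
            · exact Or.inr ⟨hp, t, ht⟩
    | c0 :: t0 =>
      simp only [List.foldl_cons, hq]
      refine ⟨?_, ?_⟩
      · rw [(ih _ b).1]; simp [hq]
      · intro c p
        rw [(ih _ b).2 c p, PySem.Dict.getD_insert]
        by_cases hc : c = c0
        · subst hc
          rw [if_pos rfl]
          simp only [List.mem_append, List.mem_singleton]
          constructor
          · rintro ((h | rfl) | ⟨hp, t, ht⟩)
            · exact Or.inl h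
            · exact Or.inr ⟨List.mem_cons_self, t0, hq⟩
            · exact Or.inr ⟨List.mem_cons_of_mem _ hp, t, ht⟩
          · rintro (h | ⟨hp, t, ht⟩)
            · exact Or.inl (Or.inl h)
            · rcases List.mem_cons.1 hp with rfl | hp
              · exact Or.inl (Or.inr rfl)
              · exact Or.inr ⟨hp, t, ht⟩
        · simp only [if_neg hc]
          constructor
          · rintro (h | ⟨hp, t, ht⟩)
            · exact Or.inl h
            · exact Or.inr ⟨List.mem_cons_of_mem _ hp, t, ht⟩
          · rintro (h | ⟨hp, t, ht⟩)
            · exact Or.inl h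
            · rcases List.mem_cons.1 hp with rfl | hp
              · rw [hq] at ht; cases ht; exact absurd rfl hc
              · exact Or.inr ⟨hp, t, ht⟩

-- A's per-line noise test equals B's bucketed position scan.
theorem cond_eq (noise_phrases : List String) (cl : String) :
    noise_phrases.any (fun p => PySem.Str.isIn p cl)
      = noisyAlt (cl) (buildBuckets noise_phrases).1 (buildBuckets noise_phrases).2 := by
  obtain ⟨hemp, hbuck⟩ := buildBuckets_spec noise_phrases PySem.Dict.empty false
  rw [Bool.eq_iff_iff]
  simp only [List.any_eq_true, PySem.Str.isIn_iff_infix]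
  unfold noisyAlt
  rw [show (buildBuckets noise_phrases).2 = _ from hemp]
  simp only [Bool.false_or]
  by_cases he : noise_phrases.any (fun p => p.toList.isEmpty) = true
  · simp only [he, if_pos]
    obtain ⟨p, hp, hpe⟩ := List.any_eq_true.1 he
    simp only [List.isEmpty_iff] at hpe
    exact iff_of_true ⟨p, hp, by rw [hpe]; exact List.nil_infix⟩ trivial
  · rw [if_neg (by simpa using he)]
    simp only [List.any_eq_true, List.mem_range]
    constructor
    · rintro ⟨p, hp, hinf⟩
      obtain ⟨j, hpre⟩ := (PySem.Chars.exists_prefix_drop_iff_isIn _ _).2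
        ((PySem.Chars.isIn_iff_infix _ _).2 hinf)
      match hpt : p.toList with
      | [] => exact absurd (List.any_eq_true.2 ⟨p, hp, by simp [hpt]⟩) he
      | c :: t =>
        rw [hpt] at hpre
        have hj : j < cl.toList.length := by
          by_contra hjl
          rw [List.drop_eq_nil_of_le (by omega)] at hpre
          exact absurd (List.prefix_nil.1 hpre) (by simp)
        refine ⟨j, hj, ?_⟩
        have hdrop : cl.toList.drop j = cl.toList[j] :: cl.toList.drop (j + 1) :=
          List.drop_eq_getElem_cons hj
        have hc : cl.toList[j] = c := by
          obtain ⟨r, hr⟩ := hpre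
          rw [hdrop, List.cons_append] at hr
          injection hr with h1 _
          exact h1.symm
        rw [List.getElem?_eq_getElem hj]
        simp only [hc]
        exact List.any_eq_true.2 ⟨p, (hbuck c p).2 (Or.inr ⟨hp, t, hpt⟩),
          (PySem.Chars.startswith_iff _ _).2 (by rw [hpt]; exact hpre)⟩
    · rintro ⟨i, hi, hmatch⟩
      rw [List.getElem?_eq_getElem hi] at hmatch
      obtain ⟨p, hpmem, hpre⟩ := List.any_eq_true.1 hmatch
      obtain (h | ⟨hp, _, _⟩) := (hbuck _ p).1 hpmem
      · simp at h
      · refine ⟨p, hp, ?_⟩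
        rw [← PySem.Chars.isIn_iff_infix, ← PySem.Chars.exists_prefix_drop_iff_isIn]
        exact ⟨i, (PySem.Chars.startswith_iff _ _).1 hpre⟩

-- A's accumulator loop is a filter.
theorem dnl_eq_filter (lines noise_phrases : List String) :
    drop_noise_lines lines noise_phrases =
      lines.filter (fun ln => !(noise_phrases.any (fun p => PySem.Str.isIn p (pyClean ln)))) := by
  unfold drop_noise_lines
  have h : (fun (out : List String) ln =>
      if noise_phrases.any (fun p => PySem.Str.isIn p (pyClean ln)) then out else out ++ [ln])
      = fun out ln =>
      if (!(noise_phrases.any (fun p => PySem.Str.isIn p (pyClean ln)))) then out ++ [id ln] else out := by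
    funext out ln
    cases hc : noise_phrases.any (fun p => PySem.Str.isIn p (pyClean ln)) <;> simp
  simp only [h]
  rw [PySem.List.foldl_append_if]
  simp

-- ===== VERDICT (by name: the statement is the Claim_ definition above) =====
theorem drop_noise_lines_spec : Claim_equal_drop_noise_lines := by
  intro lines noise_phrases _
  unfold Spec_drop_noise_lines drop_noise_lines_alt
  rw [dnl_eq_filter]
  simp only [cond_eq]
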